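-- pv_equiv track=rewrite | github.com/AlexandrWeber/Projet_RI | requetesCorpus.py | trie_documents
-- ===== SOURCE A (Python) =====
-- def trie_documents(docs_extraits, motcles_gr):
--     """
--     Cette fonction retourne la liste des documents qui ont les mots clés obligatoires et non obligatoires et n'nont pas de mots interdits
--
--     Arguments:
--         Le dictionnaire contenant les documents retrouvés, les clés: ids des documents, les valeurs : fréquences associées
--         Le dictionnaire avec les mots-clés: clé : un des opérateurs, valeur : liste des mots de la requête correspondants à cet opérateur
--     Renvoie:
--         le dictionnaire où la clé est l'id du document trouvés et la valeur est un dictionnaires avec clés: mot de la requête, valeur: sa fréquance dans le document.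
--     """
--     liste_finale=dict()
--     result_non_trie=dict()
--     for k in docs_extraits.keys():
--         listee=[]
--         mots=k
--         for t in motcles_gr["P"]:
--             if t in docs_extraits[mots].keys():
--                 listee.append(True)
--             else:
--               listee.append(False)
--         if all(listee):
--             liste_finale[mots]=docs_extraits[mots]
--
--
--     for doc in liste_finale.keys():
--         listee=[]
--         mot=doc
--         for m in motcles_gr["A"]:
--             if m in liste_finale[mot].keys():
--                 listee.append(False)
--             else:
--                 listee.append(True)
--         if all(listee):
--             result_non_trie[doc]=liste_finale[mot]
--
--     return result_non_trie
-- ===== SOURCE B (Python) =====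
-- def trie_documents(docs_extraits, motcles_gr):
--     # Inverted index + set algebra: build word -> set of doc ids once,
--     # then intersect the postings of the mandatory words and subtract the
--     # postings of the forbidden words; finally emit the surviving docs in
--     # the original insertion order.
--     if not docs_extraits:
--         return {}
--     index = {}
--     for doc_id, freqs in docs_extraits.items():
--         for word in freqs:
--             index.setdefault(word, set()).add(doc_id)
--     keep = set(docs_extraits)
--     for t in motcles_gr["P"]:
--         keep &= index.get(t, set())
--     if keep:
--         for m in motcles_gr["A"]:
--             keep -= index.get(m, set())
--     return {k: v for k, v in docs_extraits.items() if k in keep}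
-- ===== Notes on version B (the rewrite author's own statement) =====
-- stated objective: alternative
-- what changed: Replaces A's two per-document membership-scan passes (keep docs whose dict has every 'P' word, then rescan the intermediate dict dropping docs with an 'A' word) by an inverted index built once (word -> set of doc ids) followed by set algebra: intersect the postings of the mandatory words, subtract the postings of the forbidden words, and emit the surviving docs in the original order.
import Mathlib
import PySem

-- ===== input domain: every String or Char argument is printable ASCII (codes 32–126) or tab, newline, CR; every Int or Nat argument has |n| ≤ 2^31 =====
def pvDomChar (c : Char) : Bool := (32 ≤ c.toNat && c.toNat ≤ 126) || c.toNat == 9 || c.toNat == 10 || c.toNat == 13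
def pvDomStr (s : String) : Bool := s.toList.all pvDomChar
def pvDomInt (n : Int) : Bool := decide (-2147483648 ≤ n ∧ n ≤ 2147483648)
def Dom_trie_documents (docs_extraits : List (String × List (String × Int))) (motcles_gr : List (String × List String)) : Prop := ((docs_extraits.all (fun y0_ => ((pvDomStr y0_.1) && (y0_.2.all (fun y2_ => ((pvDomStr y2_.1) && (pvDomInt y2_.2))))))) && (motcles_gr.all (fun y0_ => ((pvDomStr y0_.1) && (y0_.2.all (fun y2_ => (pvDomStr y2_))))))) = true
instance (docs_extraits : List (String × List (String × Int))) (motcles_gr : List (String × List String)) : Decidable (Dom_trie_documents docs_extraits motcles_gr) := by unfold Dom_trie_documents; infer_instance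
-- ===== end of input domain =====

-- B replaces A's two per-document scan passes by an inverted index (word -> set of doc ids) and set algebra (alternative algorithm).


-- ===== PORT A =====
-- `t in d.keys()` on the inner frequency dict
def pvHasKey (v : List (String × Int)) (t : String) : Bool := (PySem.Dict.mk v).contains t

def trie_documents (docs_extraits : List (String × List (String × Int))) (motcles_gr : List (String × List String)) : List (String × List (String × Int)) :=
  let docs : PySem.Dict String (List (String × Int)) := PySem.Dict.mk docs_extraits
  let mot : PySem.Dict String (List String) := PySem.Dict.mk motcles_gr
  -- first loop: for k in docs_extraits.keys(): build listee over motcles_gr["P"], keep if all(listee)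
  let liste_finale : PySem.Dict String (List (String × Int)) :=
    docs.keys.foldl (fun lf k =>
      let listee : List Bool :=
        (mot.getD "P" []).foldl (fun l t => l ++ [pvHasKey (docs.getD k []) t]) []
      if listee.all id then lf.insert k (docs.getD k []) else lf) PySem.Dict.empty
  -- second loop: for doc in liste_finale.keys(): build listee over motcles_gr["A"], keep if all(listee)
  let result_non_trie : PySem.Dict String (List (String × Int)) :=
    liste_finale.keys.foldl (fun r doc =>
      let listee : List Bool :=
        (mot.getD "A" []).foldl (fun l m => l ++ [!(pvHasKey (liste_finale.getD doc []) m)]) []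
      if listee.all id then r.insert doc (liste_finale.getD doc []) else r) PySem.Dict.empty
  result_non_trie.items

-- ===== PORT B =====
-- Source B: inverted index word -> set of doc ids, then set intersections/differences, then one ordered emit pass
def trie_documents_alt (docs_extraits : List (String × List (String × Int))) (motcles_gr : List (String × List String)) : List (String × List (String × Int)) :=
  if docs_extraits = [] then [] else
  -- index = {}; for doc_id, freqs in docs.items(): for word in freqs: index.setdefault(word, set()).add(doc_id)
  let index : PySem.Dict String (PySem.Set String) :=
    docs_extraits.foldl (fun idx kv =>
      kv.2.foldl (fun i wf => i.modify wf.1 PySem.Set.empty (fun s => PySem.Set.add s kv.1)) idx)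
      PySem.Dict.empty
  -- keep = set(docs_extraits)
  let keep0 : PySem.Set String := PySem.Set.ofList (docs_extraits.map Prod.fst)
  -- for t in motcles_gr["P"]: keep &= index.get(t, set())
  let keepP : PySem.Set String :=
    ((PySem.Dict.mk motcles_gr).getD "P" []).foldl
      (fun s t => PySem.Set.inter s (index.getD t PySem.Set.empty)) keep0
  -- if keep: for m in motcles_gr["A"]: keep -= index.get(m, set())
  let keepA : PySem.Set String :=
    if keepP.isEmpty then keepP else
      ((PySem.Dict.mk motcles_gr).getD "A" []).foldl
        (fun s m => PySem.Set.diff s (index.getD m PySem.Set.empty)) keepP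
  -- {k: v for k, v in docs_extraits.items() if k in keep}
  docs_extraits.filter (fun kv => PySem.Set.contains keepA kv.1)

-- ===== PRECONDITION & SPEC =====
-- Pre_ excludes (a) the inputs where the Python A raises KeyError — motcles_gr lacking "P" while
-- docs_extraits is non-empty, or lacking "A" while some doc contains every "P" keyword (B raises the
-- same KeyError there) — and (b) assoc lists whose doc keys are duplicated, which cannot arise from a
-- Python dict argument.
def Pre_trie_documents (docs_extraits : List (String × List (String × Int))) (motcles_gr : List (String × List String)) : Prop :=
  (docs_extraits.map Prod.fst).Nodup ∧
  (docs_extraits ≠ [] → "P" ∈ motcles_gr.map Prod.fst) ∧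
  ((∃ kv ∈ docs_extraits, ∀ t ∈ (PySem.Dict.mk motcles_gr).getD "P" [], t ∈ kv.2.map Prod.fst) →
    "A" ∈ motcles_gr.map Prod.fst)
instance (docs_extraits : List (String × List (String × Int))) (motcles_gr : List (String × List String)) : Decidable (Pre_trie_documents docs_extraits motcles_gr) := by unfold Pre_trie_documents; infer_instance

def pvWitness_trie_documents : (List (String × List (String × Int))) × (List (String × List String)) :=
  ([("d1", [("a", 1), ("b", 2)]), ("d2", [("a", 3)])], [("P", ["a"]), ("A", ["b"])])

def Spec_trie_documents (docs_extraits : List (String × List (String × Int))) (motcles_gr : List (String × List String)) (out : List (String × List (String × Int))) : Prop := out = trie_documents_alt docs_extraits motcles_gr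
instance (docs_extraits : List (String × List (String × Int))) (motcles_gr : List (String × List String)) (out : List (String × List (String × Int))) : Decidable (Spec_trie_documents docs_extraits motcles_gr out) := by unfold Spec_trie_documents; infer_instance

-- ===== CLAIM (what is proved, stated in full; the proofs are below) =====
def Claim_equal_trie_documents : Prop := ∀ (docs_extraits : List (String × List (String × Int))) (motcles_gr : List (String × List String)), Dom_trie_documents docs_extraits motcles_gr → Pre_trie_documents docs_extraits motcles_gr → Spec_trie_documents docs_extraits motcles_gr (trie_documents docs_extraits motcles_gr)

-- ===== LEMMAS AND PROOFS =====

-- appending booleans one by one is mapping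
theorem pv_foldl_append_map {α β : Type} (f : α → β) (l : List α) (init : List β) :
    l.foldl (fun a t => a ++ [f t]) init = init ++ l.map f := by
  induction l generalizing init with
  | nil => simp
  | cons x xs ih => simp [List.foldl_cons, ih, List.append_assoc]

theorem pv_all_id_map {α : Type} (f : α → Bool) (l : List α) :
    (l.map f).all id = l.all f := by
  simp [List.all_map]

-- the shape of both of A's loops: a fold over an assoc list with Nodup keys, inserting
-- the kept pairs into an accumulator whose keys are disjoint from the list's keys, appends the filtered pairs
theorem pv_loop_filter (p : List (String × Int) → Bool) :
    ∀ (ds : List (String × List (String × Int))) (acc : PySem.Dict String (List (String × Int))),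
    (ds.map Prod.fst).Nodup →
    (∀ kv ∈ ds, acc.contains kv.1 = false) →
    (ds.foldl (fun a kv => if p kv.2 then a.insert kv.1 kv.2 else a) acc).items
      = acc.items ++ ds.filter (fun kv => p kv.2) := by
  intro ds
  induction ds with
  | nil => intro acc _ _; simp
  | cons kv rest ih =>
    intro acc hnd hdisj
    simp only [List.map_cons, List.nodup_cons] at hnd
    have hk : acc.contains kv.1 = false := hdisj kv List.mem_cons_self
    by_cases hp : p kv.2 = true
    · simp only [List.foldl_cons, hp, if_true]
      rw [ih (acc.insert kv.1 kv.2) hnd.2 ?_]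
      · simp [PySem.Dict.items_insert, hk, hp]
      · intro kv' hkv'
        rw [PySem.Dict.contains_insert]
        have hne : kv'.1 ≠ kv.1 := by
          intro h; exact hnd.1 (h ▸ List.mem_map_of_mem hkv')
        simp [hne, hdisj kv' (List.mem_cons_of_mem _ hkv')]
    · simp only [List.foldl_cons, hp, if_false, Bool.false_eq_true]
      rw [ih acc hnd.2 (fun kv' h => hdisj kv' (List.mem_cons_of_mem _ h))]
      simp [hp]

-- a fold over the keys of a Nodup assoc list, looking each key back up, is a filter of the pairs
theorem pv_keys_loop (ds : List (String × List (String × Int)))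
    (p : List (String × Int) → Bool)
    (hnd : (ds.map Prod.fst).Nodup) :
    ((PySem.Dict.mk ds).keys.foldl
        (fun (a : PySem.Dict String (List (String × Int))) k =>
          if p ((PySem.Dict.mk ds).getD k []) then a.insert k ((PySem.Dict.mk ds).getD k []) else a)
        PySem.Dict.empty).items
      = ds.filter (fun kv => p kv.2) := by
  have hkeys : (PySem.Dict.mk ds).keys = ds.map Prod.fst := rfl
  rw [hkeys, List.foldl_map]
  have hcong : ds.foldl
      (fun (a : PySem.Dict String (List (String × Int))) kv =>
        if p ((PySem.Dict.mk ds).getD kv.1 []) then a.insert kv.1 ((PySem.Dict.mk ds).getD kv.1 []) else a)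
      PySem.Dict.empty
      = ds.foldl (fun a kv => if p kv.2 then a.insert kv.1 kv.2 else a) PySem.Dict.empty := by
    apply PySem.List.foldl_congr_mem
    intro a kv hkv
    have h : (PySem.Dict.mk ds).getD kv.1 [] = kv.2 :=
      PySem.Dict.getD_of_mem_items _ hkv hnd []
    rw [h]
  rw [hcong, pv_loop_filter p ds PySem.Dict.empty hnd (fun kv _ => rfl)]
  rfl

-- A's result, characterised: the docs passing both membership predicates, in order
theorem pv_A_eq_filter (docs_extraits : List (String × List (String × Int))) (motcles_gr : List (String × List String))
    (hnd : (docs_extraits.map Prod.fst).Nodup) :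
    trie_documents docs_extraits motcles_gr
      = docs_extraits.filter (fun kv =>
          ((PySem.Dict.mk motcles_gr).getD "P" []).all (fun t => pvHasKey kv.2 t) &&
          !((PySem.Dict.mk motcles_gr).getD "A" []).any (fun m => pvHasKey kv.2 m)) := by
  unfold trie_documents
  simp only []
  set motD := PySem.Dict.mk motcles_gr with hmot
  set docsD := PySem.Dict.mk docs_extraits with hdocs
  set pP : List (String × Int) → Bool := fun v => (motD.getD "P" []).all (fun t => pvHasKey v t) with hpP
  set pA : List (String × Int) → Bool := fun v => !(motD.getD "A" []).any (fun m => pvHasKey v m) with hpA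
  have hP : ∀ v : List (String × Int),
      (((motD.getD "P" []).foldl (fun l t => l ++ [pvHasKey v t]) []).all id) = pP v := by
    intro v; rw [pv_foldl_append_map, List.nil_append, pv_all_id_map]
  have hA : ∀ v : List (String × Int),
      (((motD.getD "A" []).foldl (fun l m => l ++ [!(pvHasKey v m)]) []).all id) = pA v := by
    intro v; rw [pv_foldl_append_map, List.nil_append, pv_all_id_map, hpA]
    simp [List.all_eq_not_any_not]
  -- first loop
  have hcong1 : docsD.keys.foldl
      (fun (lf : PySem.Dict String (List (String × Int))) k =>
        if (((motD.getD "P" []).foldl (fun l t => l ++ [pvHasKey (docsD.getD k []) t]) []).all id)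
        then lf.insert k (docsD.getD k []) else lf) PySem.Dict.empty
      = docsD.keys.foldl
      (fun (lf : PySem.Dict String (List (String × Int))) k =>
        if pP (docsD.getD k []) then lf.insert k (docsD.getD k []) else lf) PySem.Dict.empty := by
    apply PySem.List.foldl_congr_mem
    intro a k _; rw [hP]
  have h1 : (docsD.keys.foldl
      (fun (lf : PySem.Dict String (List (String × Int))) k =>
        if (((motD.getD "P" []).foldl (fun l t => l ++ [pvHasKey (docsD.getD k []) t]) []).all id)
        then lf.insert k (docsD.getD k []) else lf) PySem.Dict.empty).items
      = docs_extraits.filter (fun kv => pP kv.2) := by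
    rw [hcong1, hdocs]
    exact pv_keys_loop docs_extraits pP hnd
  set lf := docsD.keys.foldl
      (fun (lf : PySem.Dict String (List (String × Int))) k =>
        if (((motD.getD "P" []).foldl (fun l t => l ++ [pvHasKey (docsD.getD k []) t]) []).all id)
        then lf.insert k (docsD.getD k []) else lf) PySem.Dict.empty with hlf
  have hlf' : lf = PySem.Dict.mk (docs_extraits.filter (fun kv => pP kv.2)) := by
    apply PySem.Dict.ext; exact h1
  have hnd1 : ((docs_extraits.filter (fun kv => pP kv.2)).map Prod.fst).Nodup :=
    hnd.sublist (List.Sublist.map Prod.fst List.filter_sublist)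
  -- second loop
  have hcong2 : lf.keys.foldl
      (fun (r : PySem.Dict String (List (String × Int))) doc =>
        if (((motD.getD "A" []).foldl (fun l m => l ++ [!(pvHasKey (lf.getD doc []) m)]) []).all id)
        then r.insert doc (lf.getD doc []) else r) PySem.Dict.empty
      = lf.keys.foldl
      (fun (r : PySem.Dict String (List (String × Int))) doc =>
        if pA (lf.getD doc []) then r.insert doc (lf.getD doc []) else r) PySem.Dict.empty := by
    apply PySem.List.foldl_congr_mem
    intro a doc _; rw [hA]
  have h2 : (lf.keys.foldl
      (fun (r : PySem.Dict String (List (String × Int))) doc =>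
        if (((motD.getD "A" []).foldl (fun l m => l ++ [!(pvHasKey (lf.getD doc []) m)]) []).all id)
        then r.insert doc (lf.getD doc []) else r) PySem.Dict.empty).items
      = (docs_extraits.filter (fun kv => pP kv.2)).filter (fun kv => pA kv.2) := by
    rw [hcong2, hlf']
    exact pv_keys_loop (docs_extraits.filter (fun kv => pP kv.2)) pA hnd1
  rw [h2, List.filter_filter]
  apply List.filter_congr
  intro kv _
  rw [Bool.and_comm]

-- membership after the inner index loop (one document's words added to the postings)
theorem pv_idx_inner (freqs : List (String × Int)) (d w k : String) :
    ∀ (idx : PySem.Dict String (PySem.Set String)),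
    (k ∈ (freqs.foldl (fun i wf => i.modify wf.1 PySem.Set.empty (fun s => PySem.Set.add s d)) idx).getD w PySem.Set.empty
      ↔ k ∈ idx.getD w PySem.Set.empty ∨ (k = d ∧ w ∈ freqs.map Prod.fst)) := by
  induction freqs with
  | nil => intro idx; simp
  | cons wf rest ih =>
    intro idx
    simp only [List.foldl_cons, ih, List.map_cons, List.mem_cons]
    rw [PySem.Dict.getD_modify]
    by_cases hw : w = wf.1
    · simp [hw, PySem.Set.mem_add]; tauto
    · simp [hw]

-- membership in the full inverted index
theorem pv_idx_mem (docs : List (String × List (String × Int))) (w k : String) :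
    ∀ (idx : PySem.Dict String (PySem.Set String)),
    (k ∈ (docs.foldl (fun idx kv =>
            kv.2.foldl (fun i wf => i.modify wf.1 PySem.Set.empty (fun s => PySem.Set.add s kv.1)) idx)
          idx).getD w PySem.Set.empty
      ↔ k ∈ idx.getD w PySem.Set.empty ∨ ∃ kv ∈ docs, kv.1 = k ∧ w ∈ kv.2.map Prod.fst) := by
  induction docs with
  | nil => intro idx; simp
  | cons kv rest ih =>
    intro idx
    simp only [List.foldl_cons, ih, pv_idx_inner, List.mem_cons]
    constructor
    · rintro (((h | ⟨hk, hw⟩)) | h)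
      · exact Or.inl h
      · exact Or.inr ⟨kv, Or.inl rfl, hk.symm, hw⟩
      · obtain ⟨kv', hkv', h1, h2⟩ := h
        exact Or.inr ⟨kv', Or.inr hkv', h1, h2⟩
    · rintro (h | ⟨kv', (rfl | hkv'), h1, h2⟩)
      · exact Or.inl (Or.inl h)
      · exact Or.inl (Or.inr ⟨h1.symm, h2⟩)
      · exact Or.inr ⟨kv', hkv', h1, h2⟩

-- membership through the intersection loop
theorem pv_inter_loop (g : String → PySem.Set String) (P : List String) (k : String) :
    ∀ (s : PySem.Set String),
    (k ∈ P.foldl (fun s t => PySem.Set.inter s (g t)) s ↔ k ∈ s ∧ ∀ t ∈ P, k ∈ g t) := by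
  induction P with
  | nil => intro s; simp
  | cons t rest ih =>
    intro s
    simp only [List.foldl_cons, ih, PySem.Set.mem_inter, List.mem_cons]
    constructor
    · rintro ⟨⟨h1, h2⟩, h3⟩; exact ⟨h1, fun t' ht' => ht'.elim (fun e => e ▸ h2) (h3 t')⟩
    · rintro ⟨h1, h2⟩; exact ⟨⟨h1, h2 t (Or.inl rfl)⟩, fun t' ht' => h2 t' (Or.inr ht')⟩

-- membership through the difference loop
theorem pv_diff_loop (g : String → PySem.Set String) (A : List String) (k : String) :
    ∀ (s : PySem.Set String),
    (k ∈ A.foldl (fun s m => PySem.Set.diff s (g m)) s ↔ k ∈ s ∧ ∀ m ∈ A, k ∉ g m) := by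
  induction A with
  | nil => intro s; simp
  | cons m rest ih =>
    intro s
    simp only [List.foldl_cons, ih, PySem.Set.mem_diff, List.mem_cons]
    constructor
    · rintro ⟨⟨h1, h2⟩, h3⟩; exact ⟨h1, fun m' hm' => hm'.elim (fun e => e ▸ h2) (h3 m')⟩
    · rintro ⟨h1, h2⟩; exact ⟨⟨h1, h2 m (Or.inl rfl)⟩, fun m' hm' => h2 m' (Or.inr hm')⟩

-- in an assoc list with Nodup keys, a pair is determined by its key
theorem pv_key_unique {β : Type} :
    ∀ (l : List (String × β)), (l.map Prod.fst).Nodup →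
    ∀ {p q : String × β}, p ∈ l → q ∈ l → p.1 = q.1 → p = q := by
  intro l
  induction l with
  | nil => intro _ p q hp; cases hp
  | cons x rest ih =>
    intro hnd p q hp hq he
    simp only [List.map_cons, List.nodup_cons] at hnd
    simp only [List.mem_cons] at hp hq
    rcases hp with hp | hp <;> rcases hq with hq | hq
    · rw [hp, hq]
    · exact absurd (by rw [← hp, he]; exact List.mem_map_of_mem hq) hnd.1
    · exact absurd (by rw [← hq, ← he]; exact List.mem_map_of_mem hp) hnd.1
    · exact ih hnd.2 hp hq he

theorem pv_hasKey_iff (v : List (String × Int)) (t : String) :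
    pvHasKey v t = true ↔ t ∈ v.map Prod.fst := by
  unfold pvHasKey
  rw [PySem.Dict.contains_iff_mem_keys]
  rfl

theorem pv_hasKey_false_iff (v : List (String × Int)) (t : String) :
    pvHasKey v t = false ↔ t ∉ v.map Prod.fst := by
  rw [Bool.eq_false_iff, Ne, pv_hasKey_iff]

-- ===== VERDICT (by name: the statement is the Claim_ definition above) =====
theorem trie_documents_spec : Claim_equal_trie_documents := by
  intro docs_extraits motcles_gr _hdom hpre
  obtain ⟨hnd, _, _⟩ := hpre
  unfold Spec_trie_documents
  rw [pv_A_eq_filter docs_extraits motcles_gr hnd]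
  unfold trie_documents_alt
  by_cases hd : docs_extraits = []
  · subst hd; simp
  · rw [if_neg hd]
    simp only []
    apply List.filter_congr
    intro kv hkv
    set motD := PySem.Dict.mk motcles_gr with hmot
    set index : PySem.Dict String (PySem.Set String) :=
      docs_extraits.foldl (fun idx kv =>
        kv.2.foldl (fun i wf => i.modify wf.1 PySem.Set.empty (fun s => PySem.Set.add s kv.1)) idx)
        PySem.Dict.empty with hindex
    -- membership in a posting list, for our fixed document kv
    have hpost : ∀ w : String, kv.1 ∈ index.getD w PySem.Set.empty ↔ w ∈ kv.2.map Prod.fst := by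
      intro w
      rw [hindex, pv_idx_mem]
      constructor
      · rintro (h | ⟨kv', hkv', h1, h2⟩)
        · simp [PySem.Dict.getD_empty] at h
        · have := pv_key_unique docs_extraits hnd hkv' hkv h1
          exact this ▸ h2
      · intro h; exact Or.inr ⟨kv, hkv, rfl, h⟩
    set keep0 : PySem.Set String := PySem.Set.ofList (docs_extraits.map Prod.fst) with hkeep0
    set keepP : PySem.Set String :=
      (motD.getD "P" []).foldl (fun s t => PySem.Set.inter s (index.getD t PySem.Set.empty)) keep0 with hkeepP
    have hmemP : kv.1 ∈ keepP ↔ ∀ t ∈ motD.getD "P" [], t ∈ kv.2.map Prod.fst := by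
      rw [hkeepP, pv_inter_loop]
      have h0 : kv.1 ∈ keep0 := by
        rw [hkeep0]; exact (PySem.Set.mem_ofList _ _).2 (List.mem_map_of_mem hkv)
      simp only [h0, true_and]
      exact ⟨fun h t ht => (hpost t).1 (h t ht), fun h t ht => (hpost t).2 (h t ht)⟩
    have hmemA : kv.1 ∈ (if keepP.isEmpty then keepP else
        (motD.getD "A" []).foldl (fun s m => PySem.Set.diff s (index.getD m PySem.Set.empty)) keepP)
        ↔ kv.1 ∈ keepP ∧ ∀ m ∈ motD.getD "A" [], ¬ m ∈ kv.2.map Prod.fst := by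
      by_cases he : keepP.isEmpty
      · rw [if_pos he]
        rw [List.isEmpty_iff] at he
        simp [he]
      · rw [if_neg he, pv_diff_loop]
        constructor
        · rintro ⟨h1, h2⟩; exact ⟨h1, fun m hm hmem => h2 m hm ((hpost m).2 hmem)⟩
        · rintro ⟨h1, h2⟩; exact ⟨h1, fun m hm hmem => h2 m hm ((hpost m).1 hmem)⟩
    rw [Bool.eq_iff_iff]
    rw [Bool.and_eq_true, PySem.Set.contains_iff, hmemA, hmemP]
    simp only [List.all_eq_true, Bool.not_eq_true', List.any_eq_false]
    constructor
    · rintro ⟨h1, h2⟩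
      exact ⟨fun t ht => (pv_hasKey_iff _ _).1 (h1 t ht),
             fun m hm => (pv_hasKey_false_iff _ _).1 (Bool.eq_false_iff.2 (h2 m hm))⟩
    · rintro ⟨h1, h2⟩
      exact ⟨fun t ht => (pv_hasKey_iff _ _).2 (h1 t ht),
             fun m hm => Bool.eq_false_iff.1 ((pv_hasKey_false_iff _ _).2 (h2 m hm))⟩
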